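-- pv_equiv track=rewrite | github.com/tofetpuzo/leetcode | data_struc/graph/route.py | routers
-- ===== SOURCE A (Python) =====
-- from collections import defaultdict, deque
-- from typing import List
--
-- def routers(routes: List[List[int]], source: int, target: int):
--     visited_stop = set()
--     visited_bus = set()
--
--     if source == target:
--         return 0
--
--     graph = defaultdict(set)
--     queue = deque([(source, 0)])
--
--     for bus, route in enumerate(routes):
--         for stop in route:
--             graph[stop].add(bus)
--
--     while queue:
--         stop, route_len = queue.popleft()
--         if stop == target:
--             return route_len
--
--         for bus in graph[stop]:
--             if bus not in visited_bus:
--                 visited_bus.add(bus)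
--             for stop in routes[bus]:
--                 if stop not in visited_stop:
--                     visited_stop.add(stop)
--                     queue.append((stop, route_len+1))
--
--     return -1
-- ===== SOURCE B (Python) =====
-- from typing import List
--
-- def routers(routes: List[List[int]], source: int, target: int):
--     if source == target:
--         return 0
--     buses_at = {}
--     for bus, route in enumerate(routes):
--         for stop in route:
--             buses_at.setdefault(stop, []).append(bus)
--     seen_stops = set()
--     seen_buses = set()
--     frontier = [source]
--     dist = 0
--     while frontier:
--         if target in frontier:
--             return dist
--         nxt = []
--         for stop in frontier:
--             for bus in buses_at.get(stop, []):
--                 if bus in seen_buses: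
--                     continue
--                 seen_buses.add(bus)
--                 for s in routes[bus]:
--                     if s not in seen_stops:
--                         seen_stops.add(s)
--                         nxt.append(s)
--         frontier = nxt
--         dist += 1
--     return -1
-- ===== Notes on version B (the rewrite author's own statement) =====
-- stated objective: alternative
-- what changed: B replaces A's deque of (stop,dist) pairs popped one at a time by a level-synchronized BFS over a plain frontier list (no distance tags, per-level target check) that skips already-boarded buses, so each route is scanned at most once; intended as faster (A rescans every bus's full route at every popped stop), measured 1.46x at the largest timing size, below the 1.5x confirmation bar.
import Mathlib
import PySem

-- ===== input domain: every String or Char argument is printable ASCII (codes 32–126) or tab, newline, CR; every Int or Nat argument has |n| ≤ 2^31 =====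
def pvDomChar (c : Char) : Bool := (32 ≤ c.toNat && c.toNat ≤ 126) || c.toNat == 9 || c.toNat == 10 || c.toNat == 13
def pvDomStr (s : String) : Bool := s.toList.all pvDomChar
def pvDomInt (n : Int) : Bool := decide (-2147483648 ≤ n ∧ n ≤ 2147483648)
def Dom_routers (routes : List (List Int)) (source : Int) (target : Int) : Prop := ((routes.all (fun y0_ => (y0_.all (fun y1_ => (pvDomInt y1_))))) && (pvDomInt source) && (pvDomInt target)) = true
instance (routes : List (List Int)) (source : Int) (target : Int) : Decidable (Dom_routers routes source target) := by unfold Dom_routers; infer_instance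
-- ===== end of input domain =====

-- B replaces A's deque-of-(stop,dist)-pairs BFS by a level-synchronized frontier BFS that
-- skips already-boarded buses, so each route is scanned at most once.

-- ===== PORT A =====
-- inner loop of A: "for s in route: if s not in visited_stop: mark; queue.append((s, d+1))"
def scanRoute (d : Int) (route : List Int) (q : List (Int × Int)) (vs : PySem.Set Int) :
    List (Int × Int) × PySem.Set Int :=
  route.foldl (fun st s => if s ∈ st.2 then st else (st.1 ++ [(s, d + 1)], PySem.Set.add st.2 s)) (q, vs)

-- A's per-bus body: 'if bus not in visited_bus: visited_bus.add(bus)' (= Set.add), then scan routes[bus] unconditionally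
def busStepA (routes : List (List Int)) (d : Int)
    (st : List (Int × Int) × PySem.Set Int × PySem.Set Int) (bus : Int) :
    List (Int × Int) × PySem.Set Int × PySem.Set Int :=
  let vb := PySem.Set.add st.2.2 bus
  let r := scanRoute d ((PySem.List.pyGet? routes bus).getD []) st.1 st.2.1
  (r.1, r.2, vb)

-- A's 'while queue' loop; fuel: one unit per pop, and pops ≤ 1 + stops ever marked visited
-- ≤ 1 + routes.flatten.length, so the 0-fuel branch is unreachable on every input
def routersLoopA (routes : List (List Int)) (target : Int)
    (graph : PySem.Dict Int (PySem.Set Int)) :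
    Nat → List (Int × Int) → PySem.Set Int → PySem.Set Int → Int
  | 0, _, _, _ => -1
  | _ + 1, [], _, _ => -1
  | fuel + 1, (stop, d) :: rest, vs, vb =>
    if stop = target then d
    else
      let st := (PySem.Dict.getD graph stop PySem.Set.empty).foldl (busStepA routes d) (rest, vs, vb)
      routersLoopA routes target graph fuel st.1 st.2.1 st.2.2

-- the BFS answer does not depend on the (hash) iteration order of the Python set graph[stop]
def routers (routes : List (List Int)) (source : Int) (target : Int) : Int :=
  if source = target then 0
  else
    let graph : PySem.Dict Int (PySem.Set Int) :=
      (PySem.List.enumerate routes).foldl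
        (fun g p => p.2.foldl
          (fun g stop => PySem.Dict.modify g stop PySem.Set.empty (fun s => PySem.Set.add s p.1)) g)
        PySem.Dict.empty
    routersLoopA routes target graph (routes.flatten.length + 2) [(source, 0)] PySem.Set.empty PySem.Set.empty

-- ===== PORT B =====
-- "for s in routes[bus]: if s not in seen_stops: mark; nxt.append(s)" — stops only, no distance tags
def scanStops (routes : List (List Int)) (bus : Int) (acc : List Int) (vs : PySem.Set Int) :
    List Int × PySem.Set Int :=
  ((PySem.List.pyGet? routes bus).getD []).foldl
    (fun r s => if s ∈ r.2 then r else (r.1 ++ [s], PySem.Set.add r.2 s)) (acc, vs)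

-- "if bus in seen_buses: continue" — a bus is boarded at most once
def takeBus (routes : List (List Int))
    (st : List Int × PySem.Set Int × PySem.Set Int) (bus : Int) :
    List Int × PySem.Set Int × PySem.Set Int :=
  if bus ∈ st.2.2 then st
  else
    let r := scanStops routes bus st.1 st.2.1
    (r.1, r.2, PySem.Set.add st.2.2 bus)

def expandStop (routes : List (List Int)) (graph : PySem.Dict Int (List Int))
    (st : List Int × PySem.Set Int × PySem.Set Int) (stop : Int) :
    List Int × PySem.Set Int × PySem.Set Int :=
  (PySem.Dict.getD graph stop []).foldl (takeBus routes) st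

-- B's 'while frontier' loop; one fuel unit per LEVEL; levels ≤ 1 + stops ever marked, so fuel suffices
def levelLoopB (routes : List (List Int)) (target : Int) (graph : PySem.Dict Int (List Int)) :
    Nat → List Int → PySem.Set Int → PySem.Set Int → Int → Int
  | 0, _, _, _, _ => -1
  | _ + 1, [], _, _, _ => -1
  | fuel + 1, f0 :: fr, vs, vb, dist =>
    if target ∈ f0 :: fr then dist
    else
      let st := (f0 :: fr).foldl (expandStop routes graph) ([], vs, vb)
      levelLoopB routes target graph fuel st.1 st.2.1 st.2.2 (dist + 1)

def routers_alt (routes : List (List Int)) (source : Int) (target : Int) : Int :=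
  if source = target then 0
  else
    let graph : PySem.Dict Int (List Int) :=
      (PySem.List.enumerate routes).foldl
        (fun g p => p.2.foldl
          (fun g stop => PySem.Dict.modify g stop [] (fun l => l ++ [p.1])) g)
        PySem.Dict.empty
    levelLoopB routes target graph (routes.flatten.length + 2) [source] PySem.Set.empty PySem.Set.empty 0

-- ===== PRECONDITION & SPEC =====
def Spec_routers (routes : List (List Int)) (source : Int) (target : Int) (out : Int) : Prop := out = routers_alt routes source target
instance (routes : List (List Int)) (source : Int) (target : Int) (out : Int) : Decidable (Spec_routers routes source target out) := by unfold Spec_routers; infer_instance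

-- ===== CLAIM (what is proved, stated in full; the proofs are below) =====
def Claim_equal_routers : Prop := ∀ (routes : List (List Int)) (source : Int) (target : Int), Dom_routers routes source target → Spec_routers routes source target (routers routes source target)

-- ===== LEMMAS AND PROOFS =====

-- invariant: every route of an already-visited bus is entirely inside visited_stop
def InvRB (routes : List (List Int)) (vs vb : PySem.Set Int) : Prop :=
  ∀ b ∈ vb, ∀ s ∈ (PySem.List.pyGet? routes b).getD [], s ∈ vs


-- tagged skip-variant of A's per-bus body (proof-side bridge between the two ports)
def busStepT (routes : List (List Int)) (d : Int)
    (st : List (Int × Int) × PySem.Set Int × PySem.Set Int) (bus : Int) :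
    List (Int × Int) × PySem.Set Int × PySem.Set Int :=
  if bus ∈ st.2.2 then st
  else
    let r := scanRoute d ((PySem.List.pyGet? routes bus).getD []) st.1 st.2.1
    (r.1, r.2, PySem.Set.add st.2.2 bus)

-- untagged sweep over an arbitrary route (scanStops with the route made explicit)
def sweepL (route : List Int) (acc : List Int) (vs : PySem.Set Int) : List Int × PySem.Set Int :=
  route.foldl (fun r s => if s ∈ r.2 then r else (r.1 ++ [s], PySem.Set.add r.2 s)) (acc, vs)

theorem scanStops_eq_sweepL (routes : List (List Int)) (bus : Int) (acc : List Int) (vs : PySem.Set Int) :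
    scanStops routes bus acc vs = sweepL ((PySem.List.pyGet? routes bus).getD []) acc vs := rfl

-- ---------- group 1: A's fold over the bus SET equals the skip fold over the bus LIST ----------

theorem scanRoute_id (d : Int) (route : List Int) (q : List (Int × Int)) (vs : PySem.Set Int)
    (h : ∀ s ∈ route, s ∈ vs) : scanRoute d route q vs = (q, vs) := by
  induction route generalizing q vs with
  | nil => rfl
  | cons a t ih =>
    simp only [scanRoute, List.foldl_cons]
    rw [if_pos (h a (by simp))]
    exact ih q vs (fun s hs => h s (by simp [hs]))

theorem scanRoute_mono (d : Int) (route : List Int) (q : List (Int × Int)) (vs : PySem.Set Int)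
    (x : Int) (hx : x ∈ vs) : x ∈ (scanRoute d route q vs).2 := by
  induction route generalizing q vs with
  | nil => exact hx
  | cons a t ih =>
    simp only [scanRoute, List.foldl_cons]
    by_cases h : a ∈ vs
    · rw [if_pos h]; exact ih q vs hx
    · rw [if_neg h]
      exact ih _ _ (by simp [PySem.Set.mem_add, hx])

theorem scanRoute_covers (d : Int) (route : List Int) (q : List (Int × Int)) (vs : PySem.Set Int)
    (x : Int) (hx : x ∈ route) : x ∈ (scanRoute d route q vs).2 := by
  induction route generalizing q vs with
  | nil => cases hx
  | cons a t ih =>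
    simp only [scanRoute, List.foldl_cons]
    rcases List.mem_cons.mp hx with h | h
    · subst h
      by_cases hm : x ∈ vs
      · rw [if_pos hm]; exact scanRoute_mono d t q vs x hm
      · rw [if_neg hm]
        exact scanRoute_mono d t _ _ x (by simp [PySem.Set.mem_add])
    · by_cases hm : a ∈ vs
      · rw [if_pos hm]; exact ih q vs h
      · rw [if_neg hm]; exact ih _ _ h

theorem busStepT_of_mem (routes : List (List Int)) (d : Int)
    (st : List (Int × Int) × PySem.Set Int × PySem.Set Int) (bus : Int)
    (h : bus ∈ st.2.2) : busStepT routes d st bus = st := by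
  unfold busStepT; rw [if_pos h]

theorem busStepT_vb_mono (routes : List (List Int)) (d : Int)
    (st : List (Int × Int) × PySem.Set Int × PySem.Set Int) (bus x : Int)
    (hx : x ∈ st.2.2) : x ∈ (busStepT routes d st bus).2.2 := by
  unfold busStepT
  by_cases h : bus ∈ st.2.2
  · rw [if_pos h]; exact hx
  · rw [if_neg h]; simp [PySem.Set.mem_add, hx]

theorem foldT_vb_mono (routes : List (List Int)) (d : Int) (lb : List Int)
    (st : List (Int × Int) × PySem.Set Int × PySem.Set Int) (x : Int)
    (hx : x ∈ st.2.2) : x ∈ (lb.foldl (busStepT routes d) st).2.2 := by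
  induction lb generalizing st with
  | nil => exact hx
  | cons b t ih => exact ih _ (busStepT_vb_mono routes d st b x hx)

theorem foldT_vb_covers (routes : List (List Int)) (d : Int) (lb : List Int)
    (st : List (Int × Int) × PySem.Set Int × PySem.Set Int) (x : Int)
    (hx : x ∈ lb) : x ∈ (lb.foldl (busStepT routes d) st).2.2 := by
  induction lb generalizing st with
  | nil => cases hx
  | cons b t ih =>
    rcases List.mem_cons.mp hx with h | h
    · subst h
      have hm : x ∈ (busStepT routes d st x).2.2 := by
        unfold busStepT
        by_cases hm : x ∈ st.2.2
        · rw [if_pos hm]; exact hm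
        · rw [if_neg hm]; simp [PySem.Set.mem_add]
      exact foldT_vb_mono routes d t _ x hm
    · exact ih _ h

theorem busStepT_inv (routes : List (List Int)) (d : Int)
    (st : List (Int × Int) × PySem.Set Int × PySem.Set Int) (bus : Int)
    (h : InvRB routes st.2.1 st.2.2) :
    InvRB routes (busStepT routes d st bus).2.1 (busStepT routes d st bus).2.2 := by
  unfold busStepT
  by_cases hm : bus ∈ st.2.2
  · rw [if_pos hm]; exact h
  · rw [if_neg hm]
    intro b hb s hs
    simp only [PySem.Set.mem_add] at hb
    rcases hb with hb | hb
    · exact scanRoute_mono d _ _ _ s (h b hb s hs)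
    · subst hb; exact scanRoute_covers d _ _ _ s hs

theorem foldT_inv (routes : List (List Int)) (d : Int) (lb : List Int)
    (st : List (Int × Int) × PySem.Set Int × PySem.Set Int)
    (h : InvRB routes st.2.1 st.2.2) :
    InvRB routes (lb.foldl (busStepT routes d) st).2.1 (lb.foldl (busStepT routes d) st).2.2 := by
  induction lb generalizing st with
  | nil => exact h
  | cons b t ih => exact ih _ (busStepT_inv routes d st b h)

theorem busStepA_eq_busStepT (routes : List (List Int)) (d : Int)
    (st : List (Int × Int) × PySem.Set Int × PySem.Set Int) (bus : Int)
    (h : InvRB routes st.2.1 st.2.2) :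
    busStepA routes d st bus = busStepT routes d st bus := by
  unfold busStepA busStepT
  by_cases hm : bus ∈ st.2.2
  · rw [if_pos hm, PySem.Set.add_of_mem hm,
      scanRoute_id d _ _ _ (fun s hs => h bus hm s hs)]
  · rw [if_neg hm]

theorem foldA_eq_foldT (routes : List (List Int)) (d : Int) (lb : List Int)
    (st : List (Int × Int) × PySem.Set Int × PySem.Set Int)
    (h : InvRB routes st.2.1 st.2.2) :
    (PySem.Set.ofList lb).foldl (busStepA routes d) st = lb.foldl (busStepT routes d) st := by
  induction lb using List.reverseRecOn with
  | nil => rfl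
  | append_singleton t b ih =>
    rw [PySem.Set.ofList_append_singleton, List.foldl_append]
    by_cases hb : b ∈ PySem.Set.ofList t
    · rw [PySem.Set.add_of_mem hb, ih, List.foldl_cons, List.foldl_nil]
      have hbt : b ∈ t := (PySem.Set.mem_ofList _ _).mp hb
      have hin : b ∈ (t.foldl (busStepT routes d) st).2.2 :=
        foldT_vb_covers routes d t st b hbt
      exact (busStepT_of_mem routes d _ b hin).symm
    · rw [PySem.Set.add_of_not_mem hb, List.foldl_append, ih,
        List.foldl_cons, List.foldl_nil, List.foldl_cons, List.foldl_nil]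
      exact busStepA_eq_busStepT routes d _ b (foldT_inv routes d t st h)

theorem graph_rel (routes : List (List Int)) :
    ∀ k, PySem.Dict.getD
        ((PySem.List.enumerate routes).foldl
          (fun g p => p.2.foldl
            (fun g stop => PySem.Dict.modify g stop PySem.Set.empty (fun s => PySem.Set.add s p.1)) g)
          PySem.Dict.empty) k PySem.Set.empty
      = PySem.Set.ofList (PySem.Dict.getD
        ((PySem.List.enumerate routes).foldl
          (fun g p => p.2.foldl
            (fun g stop => PySem.Dict.modify g stop [] (fun l => l ++ [p.1])) g)
          PySem.Dict.empty) k []) := by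
  suffices H : ∀ (pairs : List (Int × List Int)) (gA : PySem.Dict Int (PySem.Set Int))
      (gB : PySem.Dict Int (List Int)),
      (∀ k, PySem.Dict.getD gA k PySem.Set.empty = PySem.Set.ofList (PySem.Dict.getD gB k [])) →
      ∀ k, PySem.Dict.getD (pairs.foldl
          (fun g p => p.2.foldl
            (fun g stop => PySem.Dict.modify g stop PySem.Set.empty (fun s => PySem.Set.add s p.1)) g) gA)
          k PySem.Set.empty
        = PySem.Set.ofList (PySem.Dict.getD (pairs.foldl
          (fun g p => p.2.foldl
            (fun g stop => PySem.Dict.modify g stop [] (fun l => l ++ [p.1])) g) gB) k []) by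
    exact H (PySem.List.enumerate routes) PySem.Dict.empty PySem.Dict.empty
      (fun k => by simp [PySem.Dict.getD_empty, PySem.Set.ofList])
  intro pairs
  induction pairs with
  | nil => intro gA gB h k; exact h k
  | cons p t iht =>
    intro gA gB h k
    simp only [List.foldl_cons]
    apply iht
    clear k
    have : ∀ (route : List Int) (gA : PySem.Dict Int (PySem.Set Int)) (gB : PySem.Dict Int (List Int)),
        (∀ k, PySem.Dict.getD gA k PySem.Set.empty = PySem.Set.ofList (PySem.Dict.getD gB k [])) →
        ∀ k, PySem.Dict.getD (route.foldl
            (fun g stop => PySem.Dict.modify g stop PySem.Set.empty (fun s => PySem.Set.add s p.1)) gA)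
            k PySem.Set.empty
          = PySem.Set.ofList (PySem.Dict.getD (route.foldl
            (fun g stop => PySem.Dict.modify g stop [] (fun l => l ++ [p.1])) gB) k []) := by
      intro route
      induction route with
      | nil => intro gA gB h k; exact h k
      | cons a r ihr =>
        intro gA gB h k
        simp only [List.foldl_cons]
        apply ihr
        intro k'
        rw [PySem.Dict.getD_modify, PySem.Dict.getD_modify]
        by_cases hk : k' = a
        · rw [if_pos hk, if_pos hk, h a, PySem.Set.ofList_append_singleton]
        · rw [if_neg hk, if_neg hk, h k']
    exact this p.2 gA gB h

-- ---------- group 2: shifts and the tagged↔untagged bridge ----------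

theorem sweepL_shift (route : List Int) : ∀ (acc : List Int) (vs : PySem.Set Int),
    sweepL route acc vs = (acc ++ (sweepL route [] vs).1, (sweepL route [] vs).2) := by
  induction route with
  | nil => intro acc vs; simp [sweepL]
  | cons a t ih =>
    intro acc vs
    by_cases h : a ∈ vs
    · have e1 : sweepL (a :: t) acc vs = sweepL t acc vs := by
        simp only [sweepL, List.foldl_cons]; rw [if_pos h]
      have e2 : sweepL (a :: t) [] vs = sweepL t [] vs := by
        simp only [sweepL, List.foldl_cons]; rw [if_pos h]
      rw [e1, e2]; exact ih acc vs
    · have e1 : sweepL (a :: t) acc vs = sweepL t (acc ++ [a]) (PySem.Set.add vs a) := by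
        simp only [sweepL, List.foldl_cons]; rw [if_neg h]; try simp only [List.nil_append]
      have e2 : sweepL (a :: t) [] vs = sweepL t [a] (PySem.Set.add vs a) := by
        simp only [sweepL, List.foldl_cons]; rw [if_neg h]; try simp only [List.nil_append]
      rw [e1, e2, ih (acc ++ [a]) _, ih [a] _]
      simp

theorem scanRoute_shift (d : Int) (route : List Int) : ∀ (q : List (Int × Int)) (vs : PySem.Set Int),
    scanRoute d route q vs = (q ++ (scanRoute d route [] vs).1, (scanRoute d route [] vs).2) := by
  induction route with
  | nil => intro q vs; simp [scanRoute]
  | cons a t ih =>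
    intro q vs
    by_cases h : a ∈ vs
    · have e1 : scanRoute d (a :: t) q vs = scanRoute d t q vs := by
        simp only [scanRoute, List.foldl_cons]; rw [if_pos h]
      have e2 : scanRoute d (a :: t) [] vs = scanRoute d t [] vs := by
        simp only [scanRoute, List.foldl_cons]; rw [if_pos h]
      rw [e1, e2]; exact ih q vs
    · have e1 : scanRoute d (a :: t) q vs = scanRoute d t (q ++ [(a, d + 1)]) (PySem.Set.add vs a) := by
        simp only [scanRoute, List.foldl_cons]; rw [if_neg h]; try simp only [List.nil_append]
      have e2 : scanRoute d (a :: t) [] vs = scanRoute d t [(a, d + 1)] (PySem.Set.add vs a) := by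
        simp only [scanRoute, List.foldl_cons]; rw [if_neg h]; try simp only [List.nil_append]
      rw [e1, e2, ih (q ++ [(a, d + 1)]) _, ih [(a, d + 1)] _]
      simp

theorem scanRoute_eq_sweepL (d : Int) (route : List Int) : ∀ (vs : PySem.Set Int),
    scanRoute d route [] vs
      = ((sweepL route [] vs).1.map (fun s => (s, d + 1)), (sweepL route [] vs).2) := by
  induction route with
  | nil => intro vs; simp [scanRoute, sweepL]
  | cons a t ih =>
    intro vs
    by_cases h : a ∈ vs
    · have e1 : scanRoute d (a :: t) [] vs = scanRoute d t [] vs := by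
        simp only [scanRoute, List.foldl_cons]; rw [if_pos h]
      have e2 : sweepL (a :: t) [] vs = sweepL t [] vs := by
        simp only [sweepL, List.foldl_cons]; rw [if_pos h]
      rw [e1, e2]; exact ih vs
    · have e1 : scanRoute d (a :: t) [] vs = scanRoute d t [(a, d + 1)] (PySem.Set.add vs a) := by
        simp only [scanRoute, List.foldl_cons]; rw [if_neg h]; try simp only [List.nil_append]
      have e2 : sweepL (a :: t) [] vs = sweepL t [a] (PySem.Set.add vs a) := by
        simp only [sweepL, List.foldl_cons]; rw [if_neg h]; try simp only [List.nil_append]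
      rw [e1, e2, scanRoute_shift d t [(a, d + 1)] _, sweepL_shift t [a] _, ih _]
      simp

theorem takeBus_shift (routes : List (List Int)) (acc : List Int) (vs vb : PySem.Set Int) (bus : Int) :
    takeBus routes (acc, vs, vb) bus
      = (acc ++ (takeBus routes ([], vs, vb) bus).1,
         (takeBus routes ([], vs, vb) bus).2.1, (takeBus routes ([], vs, vb) bus).2.2) := by
  unfold takeBus
  by_cases h : bus ∈ vb
  · rw [if_pos h, if_pos h]; simp
  · rw [if_neg h, if_neg h]
    simp only [scanStops_eq_sweepL]
    rw [sweepL_shift _ acc vs]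

theorem foldL_shift (routes : List (List Int)) (lb : List Int) : ∀ (acc : List Int) (vs vb : PySem.Set Int),
    lb.foldl (takeBus routes) (acc, vs, vb)
      = (acc ++ (lb.foldl (takeBus routes) ([], vs, vb)).1,
         (lb.foldl (takeBus routes) ([], vs, vb)).2.1, (lb.foldl (takeBus routes) ([], vs, vb)).2.2) := by
  induction lb with
  | nil => intro acc vs vb; simp
  | cons b t ih =>
    intro acc vs vb
    rw [List.foldl_cons, List.foldl_cons, takeBus_shift routes acc vs vb b]
    rcases hP : takeBus routes ([], vs, vb) b with ⟨δ, vs1, vb1⟩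
    rw [ih (acc ++ δ) vs1 vb1, ih δ vs1 vb1]
    simp

theorem busStepT_eq_takeBus (routes : List (List Int)) (d : Int) (q : List (Int × Int))
    (vs vb : PySem.Set Int) (bus : Int) :
    busStepT routes d (q, vs, vb) bus
      = (q ++ ((takeBus routes ([], vs, vb) bus).1).map (fun s => (s, d + 1)),
         (takeBus routes ([], vs, vb) bus).2.1, (takeBus routes ([], vs, vb) bus).2.2) := by
  unfold busStepT takeBus
  by_cases h : bus ∈ vb
  · rw [if_pos h, if_pos h]; simp
  · rw [if_neg h, if_neg h]
    simp only [scanStops_eq_sweepL]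
    rw [scanRoute_shift d _ q vs, scanRoute_eq_sweepL d _ vs]

theorem foldT_eq_foldL (routes : List (List Int)) (d : Int) (lb : List Int) : ∀ (q : List (Int × Int))
    (vs vb : PySem.Set Int),
    lb.foldl (busStepT routes d) (q, vs, vb)
      = (q ++ ((lb.foldl (takeBus routes) ([], vs, vb)).1).map (fun s => (s, d + 1)),
         (lb.foldl (takeBus routes) ([], vs, vb)).2.1, (lb.foldl (takeBus routes) ([], vs, vb)).2.2) := by
  induction lb with
  | nil => intro q vs vb; simp
  | cons b t ih =>
    intro q vs vb
    rw [List.foldl_cons, List.foldl_cons, busStepT_eq_takeBus routes d q vs vb b]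
    rcases hP : takeBus routes ([], vs, vb) b with ⟨δ, vs1, vb1⟩
    rw [ih (q ++ δ.map (fun s => (s, d + 1))) vs1 vb1, foldL_shift routes t δ vs1 vb1]
    simp

-- A-side per-stop expansion (no invariant needed): queue only grows, and new entries carry tag d+1
theorem foldA_shift (routes : List (List Int)) (d : Int) (lb : List Int) : ∀ (q : List (Int × Int))
    (vs vb : PySem.Set Int),
    lb.foldl (busStepA routes d) (q, vs, vb)
      = (q ++ (lb.foldl (busStepA routes d) ([], vs, vb)).1,
         (lb.foldl (busStepA routes d) ([], vs, vb)).2.1, (lb.foldl (busStepA routes d) ([], vs, vb)).2.2) := by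
  induction lb with
  | nil => intro q vs vb; simp
  | cons b t ih =>
    intro q vs vb
    rw [List.foldl_cons, List.foldl_cons]
    have e : ∀ (q' : List (Int × Int)), busStepA routes d (q', vs, vb) b
        = (q' ++ (scanRoute d ((PySem.List.pyGet? routes b).getD []) [] vs).1,
           (scanRoute d ((PySem.List.pyGet? routes b).getD []) [] vs).2, PySem.Set.add vb b) := by
      intro q'
      unfold busStepA
      rw [scanRoute_shift d _ q' vs]
    rw [e q, e []]
    rcases hP : scanRoute d ((PySem.List.pyGet? routes b).getD []) [] vs with ⟨δ, vs1⟩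
    simp only [List.nil_append]
    rw [ih (q ++ δ) vs1 (PySem.Set.add vb b), ih δ vs1 (PySem.Set.add vb b)]
    simp

theorem foldA_tags (routes : List (List Int)) (d : Int) (lb : List Int) : ∀ (vs vb : PySem.Set Int),
    ∃ Δ : List Int, (lb.foldl (busStepA routes d) ([], vs, vb)).1 = Δ.map (fun s => (s, d + 1)) := by
  induction lb with
  | nil => intro vs vb; exact ⟨[], rfl⟩
  | cons b t ih =>
    intro vs vb
    rw [List.foldl_cons]
    have e : busStepA routes d ([], vs, vb) b
        = ((sweepL ((PySem.List.pyGet? routes b).getD []) [] vs).1.map (fun s => (s, d + 1)),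
           (sweepL ((PySem.List.pyGet? routes b).getD []) [] vs).2, PySem.Set.add vb b) := by
      unfold busStepA
      rw [scanRoute_eq_sweepL d _ vs]
    rw [e]
    rcases ih (sweepL ((PySem.List.pyGet? routes b).getD []) [] vs).2 (PySem.Set.add vb b) with ⟨Δ, hΔ⟩
    refine ⟨(sweepL ((PySem.List.pyGet? routes b).getD []) [] vs).1 ++ Δ, ?_⟩
    rw [foldA_shift routes d t _ _ _, hΔ]
    simp

-- ---------- group 3: level decomposition of A's queue loop ----------

-- A-side whole-level expansion starting from an empty queue
def levelA (routes : List (List Int)) (gA : PySem.Dict Int (PySem.Set Int)) (d : Int)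
    (L : List Int) (vs vb : PySem.Set Int) :
    List (Int × Int) × PySem.Set Int × PySem.Set Int :=
  L.foldl (fun st a => (PySem.Dict.getD gA a PySem.Set.empty).foldl (busStepA routes d) st) ([], vs, vb)

-- B-side whole-level expansion (exactly the fold in levelLoopB)
def levelB (routes : List (List Int)) (gB : PySem.Dict Int (List Int))
    (L : List Int) (vs vb : PySem.Set Int) :
    List Int × PySem.Set Int × PySem.Set Int :=
  L.foldl (expandStop routes gB) ([], vs, vb)

theorem sweepL_mono (route : List Int) (acc : List Int) (vs : PySem.Set Int) (x : Int)
    (hx : x ∈ vs) : x ∈ (sweepL route acc vs).2 := by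
  rw [sweepL_shift]
  have h := congrArg Prod.snd (scanRoute_eq_sweepL 0 route vs)
  simp only at h
  rw [← h]
  exact scanRoute_mono 0 route [] vs x hx

theorem sweepL_covers (route : List Int) (acc : List Int) (vs : PySem.Set Int) (x : Int)
    (hx : x ∈ route) : x ∈ (sweepL route acc vs).2 := by
  rw [sweepL_shift]
  have h := congrArg Prod.snd (scanRoute_eq_sweepL 0 route vs)
  simp only at h
  rw [← h]
  exact scanRoute_covers 0 route [] vs x hx

theorem takeBus_inv (routes : List (List Int))
    (st : List Int × PySem.Set Int × PySem.Set Int) (bus : Int)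
    (h : InvRB routes st.2.1 st.2.2) :
    InvRB routes (takeBus routes st bus).2.1 (takeBus routes st bus).2.2 := by
  unfold takeBus
  by_cases hm : bus ∈ st.2.2
  · rw [if_pos hm]; exact h
  · rw [if_neg hm]
    intro b hb s hs
    simp only [PySem.Set.mem_add] at hb
    simp only [scanStops_eq_sweepL]
    rcases hb with hb | hb
    · exact sweepL_mono _ _ _ s (h b hb s hs)
    · subst hb; exact sweepL_covers _ _ _ s hs

-- shift for a whole level (A side)
theorem levelA_shift (routes : List (List Int)) (gA : PySem.Dict Int (PySem.Set Int)) (d : Int)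
    (L : List Int) : ∀ (q : List (Int × Int)) (vs vb : PySem.Set Int),
    L.foldl (fun st a => (PySem.Dict.getD gA a PySem.Set.empty).foldl (busStepA routes d) st) (q, vs, vb)
      = (q ++ (levelA routes gA d L vs vb).1, (levelA routes gA d L vs vb).2.1, (levelA routes gA d L vs vb).2.2) := by
  induction L with
  | nil => intro q vs vb; simp [levelA]
  | cons a t ih =>
    intro q vs vb
    have e : levelA routes gA d (a :: t) vs vb
        = t.foldl (fun st a => (PySem.Dict.getD gA a PySem.Set.empty).foldl (busStepA routes d) st)
            ((PySem.Dict.getD gA a PySem.Set.empty).foldl (busStepA routes d) ([], vs, vb)) := by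
      simp [levelA]
    rw [List.foldl_cons, e]
    rw [foldA_shift routes d (PySem.Dict.getD gA a PySem.Set.empty) q vs vb]
    rcases hP : (PySem.Dict.getD gA a PySem.Set.empty).foldl (busStepA routes d) ([], vs, vb) with ⟨δ, vs1, vb1⟩
    rw [ih (q ++ δ) vs1 vb1, ih δ vs1 vb1]
    simp

-- shift for a whole level (B side)
theorem levelB_shift (routes : List (List Int)) (gB : PySem.Dict Int (List Int))
    (L : List Int) : ∀ (acc : List Int) (vs vb : PySem.Set Int),
    L.foldl (expandStop routes gB) (acc, vs, vb)
      = (acc ++ (levelB routes gB L vs vb).1, (levelB routes gB L vs vb).2.1, (levelB routes gB L vs vb).2.2) := by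
  induction L with
  | nil => intro acc vs vb; simp [levelB]
  | cons a t ih =>
    intro acc vs vb
    have e : levelB routes gB (a :: t) vs vb
        = t.foldl (expandStop routes gB) (expandStop routes gB ([], vs, vb) a) := by
      simp [levelB]
    rw [List.foldl_cons, e]
    have e2 : expandStop routes gB (acc, vs, vb) a
        = (acc ++ (expandStop routes gB ([], vs, vb) a).1,
           (expandStop routes gB ([], vs, vb) a).2.1, (expandStop routes gB ([], vs, vb) a).2.2) := by
      unfold expandStop
      exact foldL_shift routes _ acc vs vb
    rw [e2]
    rcases hP : expandStop routes gB ([], vs, vb) a with ⟨δ, vs1, vb1⟩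
    rw [ih (acc ++ δ) vs1 vb1, ih δ vs1 vb1]
    simp

theorem loopA_finds (routes : List (List Int)) (target : Int) (gA : PySem.Dict Int (PySem.Set Int))
    (d : Int) :
    ∀ (l1 l2 : List Int) (vs vb : PySem.Set Int) (f : Nat),
      target ∈ l1 → l1.length ≤ f →
      routersLoopA routes target gA f (l1.map (fun s => (s, d)) ++ l2.map (fun s => (s, d + 1))) vs vb = d := by
  intro l1
  induction l1 with
  | nil => intro l2 vs vb f h; cases h
  | cons a t ih =>
    intro l2 vs vb f hmem hf
    match f, hf with
    | f + 1, hf =>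
      simp only [List.map_cons, List.cons_append]
      simp only [routersLoopA]
      by_cases ht : a = target
      · rw [if_pos ht]
      · rw [if_neg ht]
        rcases hE : (PySem.Dict.getD gA a PySem.Set.empty).foldl (busStepA routes d)
            (([] : List (Int × Int)), vs, vb) with ⟨q0, vs1, vb1⟩
        rcases foldA_tags routes d (PySem.Dict.getD gA a PySem.Set.empty) vs vb with ⟨Δ, hΔ⟩
        rw [hE] at hΔ
        simp only at hΔ
        subst hΔ
        have hq := foldA_shift routes d (PySem.Dict.getD gA a PySem.Set.empty)
          (t.map (fun s => (s, d)) ++ l2.map (fun s => (s, d + 1))) vs vb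
        rw [hE] at hq
        simp only at hq
        rw [hq]
        have hq2 : t.map (fun s => (s, d)) ++ l2.map (fun s => (s, d + 1)) ++ Δ.map (fun s => (s, d + 1))
            = t.map (fun s => (s, d)) ++ (l2 ++ Δ).map (fun s => (s, d + 1)) := by simp
        rw [hq2]
        have hmem' : target ∈ t := by
          rcases List.mem_cons.mp hmem with h | h
          · exact absurd h.symm ht
          · exact h
        exact ih (l2 ++ Δ) vs1 vb1 f hmem' (Nat.le_of_succ_le_succ hf)

theorem loopA_level (routes : List (List Int)) (target : Int) (gA : PySem.Dict Int (PySem.Set Int))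
    (d : Int) :
    ∀ (l1 l2 : List Int) (vs vb : PySem.Set Int) (f : Nat),
      target ∉ l1 → l1.length ≤ f →
      routersLoopA routes target gA f (l1.map (fun s => (s, d)) ++ l2.map (fun s => (s, d + 1))) vs vb
        = routersLoopA routes target gA (f - l1.length)
            (l2.map (fun s => (s, d + 1)) ++ (levelA routes gA d l1 vs vb).1)
            (levelA routes gA d l1 vs vb).2.1 (levelA routes gA d l1 vs vb).2.2 := by
  intro l1
  induction l1 with
  | nil =>
    intro l2 vs vb f _ _
    simp [levelA]
  | cons a t ih =>
    intro l2 vs vb f hmem hf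
    match f, hf with
    | f + 1, hf =>
      simp only [List.map_cons, List.cons_append]
      simp only [routersLoopA]
      have ht : ¬ (a = target) := fun h => hmem (by simp [h])
      rw [if_neg ht]
      rcases hE : (PySem.Dict.getD gA a PySem.Set.empty).foldl (busStepA routes d)
          (([] : List (Int × Int)), vs, vb) with ⟨q0, vs1, vb1⟩
      rcases foldA_tags routes d (PySem.Dict.getD gA a PySem.Set.empty) vs vb with ⟨Δ, hΔ⟩
      rw [hE] at hΔ
      simp only at hΔ
      subst hΔ
      have hq := foldA_shift routes d (PySem.Dict.getD gA a PySem.Set.empty)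
        (t.map (fun s => (s, d)) ++ l2.map (fun s => (s, d + 1))) vs vb
      rw [hE] at hq
      simp only at hq
      rw [hq]
      have hq2 : t.map (fun s => (s, d)) ++ l2.map (fun s => (s, d + 1)) ++ Δ.map (fun s => (s, d + 1))
          = t.map (fun s => (s, d)) ++ ((l2 ++ Δ).map (fun s => (s, d + 1))) := by simp
      rw [hq2]
      have hmem' : target ∉ t := fun h => hmem (by simp [h])
      rw [ih (l2 ++ Δ) vs1 vb1 f hmem' (Nat.le_of_succ_le_succ hf)]
      have eL : levelA routes gA d (a :: t) vs vb
          = (Δ.map (fun s => (s, d + 1)) ++ (levelA routes gA d t vs1 vb1).1,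
             (levelA routes gA d t vs1 vb1).2.1, (levelA routes gA d t vs1 vb1).2.2) := by
        show (a :: t).foldl (fun st a => (PySem.Dict.getD gA a PySem.Set.empty).foldl (busStepA routes d) st) ([], vs, vb) = _
        rw [List.foldl_cons]
        show t.foldl _ ((PySem.Dict.getD gA a PySem.Set.empty).foldl (busStepA routes d) ([], vs, vb)) = _
        rw [hE, levelA_shift routes gA d t _ vs1 vb1]
      rw [eL]
      have hsub : (f + 1) - (a :: t).length = f - t.length := by simp
      rw [hsub]
      simp

-- skip-fold preserves the invariant (untagged side)
theorem foldL_inv (routes : List (List Int)) (lb : List Int) :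
    ∀ (st : List Int × PySem.Set Int × PySem.Set Int),
    InvRB routes st.2.1 st.2.2 →
    InvRB routes (lb.foldl (takeBus routes) st).2.1 (lb.foldl (takeBus routes) st).2.2 := by
  induction lb with
  | nil => intro st h; exact h
  | cons b t ih => intro st h; exact ih _ (takeBus_inv routes st b h)

theorem levelB_inv (routes : List (List Int)) (gB : PySem.Dict Int (List Int))
    (L : List Int) : ∀ (vs vb : PySem.Set Int), InvRB routes vs vb →
    InvRB routes (levelB routes gB L vs vb).2.1 (levelB routes gB L vs vb).2.2 := by
  suffices H : ∀ (st : List Int × PySem.Set Int × PySem.Set Int), InvRB routes st.2.1 st.2.2 →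
      InvRB routes (L.foldl (expandStop routes gB) st).2.1 (L.foldl (expandStop routes gB) st).2.2 by
    intro vs vb h; exact H ([], vs, vb) h
  induction L with
  | nil => intro st h; exact h
  | cons a t ih =>
    intro st h
    exact ih _ (foldL_inv routes _ st h)

theorem levelA_eq_levelB (routes : List (List Int)) (gA : PySem.Dict Int (PySem.Set Int))
    (gB : PySem.Dict Int (List Int))
    (hg : ∀ k, PySem.Dict.getD gA k PySem.Set.empty = PySem.Set.ofList (PySem.Dict.getD gB k []))
    (d : Int) :
    ∀ (L : List Int) (vs vb : PySem.Set Int), InvRB routes vs vb →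
      levelA routes gA d L vs vb
        = ((levelB routes gB L vs vb).1.map (fun s => (s, d + 1)),
           (levelB routes gB L vs vb).2.1, (levelB routes gB L vs vb).2.2) := by
  intro L
  induction L with
  | nil => intro vs vb _; simp [levelA, levelB]
  | cons a t ih =>
    intro vs vb hinv
    have stepA : (PySem.Dict.getD gA a PySem.Set.empty).foldl (busStepA routes d) (([] : List (Int × Int)), vs, vb)
        = ((expandStop routes gB ([], vs, vb) a).1.map (fun s => (s, d + 1)),
           (expandStop routes gB ([], vs, vb) a).2.1, (expandStop routes gB ([], vs, vb) a).2.2) := by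
      rw [hg a, foldA_eq_foldT routes d _ _ hinv, foldT_eq_foldL routes d _ [] vs vb]
      simp [expandStop]
    have eA : levelA routes gA d (a :: t) vs vb
        = t.foldl (fun st a => (PySem.Dict.getD gA a PySem.Set.empty).foldl (busStepA routes d) st)
            ((PySem.Dict.getD gA a PySem.Set.empty).foldl (busStepA routes d) ([], vs, vb)) := by
      simp [levelA]
    have eB : levelB routes gB (a :: t) vs vb
        = t.foldl (expandStop routes gB) (expandStop routes gB ([], vs, vb) a) := by
      simp [levelB]
    rcases hP : expandStop routes gB ([], vs, vb) a with ⟨δ, vs1, vb1⟩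
    have hinv1 : InvRB routes vs1 vb1 := by
      have := foldL_inv routes (PySem.Dict.getD gB a []) ([], vs, vb) hinv
      simp only [expandStop] at hP
      rw [hP] at this
      exact this
    rw [eA, eB, stepA, hP]
    simp only
    rw [levelA_shift routes gA d t _ vs1 vb1, levelB_shift routes gB t δ vs1 vb1,
      ih vs1 vb1 hinv1]
    simp

-- ---------- group 4: progress counting ----------

-- number of distinct stops not yet marked visited
def U (routes : List (List Int)) (vs : PySem.Set Int) : Nat :=
  ((routes.flatten.dedup).filter (fun s => decide (s ∉ vs))).length

-- "one expansion step": the accumulator grows by fresh, distinct stops of the network,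
-- and the visited set grows by exactly those stops
def Step (routes : List (List Int)) (p q : List Int × PySem.Set Int) : Prop :=
  ∃ δ : List Int, q.1 = p.1 ++ δ ∧ δ.Nodup ∧ (∀ x ∈ δ, x ∉ p.2 ∧ x ∈ routes.flatten) ∧
    (∀ x, x ∈ q.2 ↔ x ∈ p.2 ∨ x ∈ δ)

theorem Step_refl (routes : List (List Int)) (p : List Int × PySem.Set Int) : Step routes p p := by
  exact ⟨[], by simp, by simp, by simp, by simp⟩

theorem Step_trans (routes : List (List Int)) (p q r : List Int × PySem.Set Int)
    (h1 : Step routes p q) (h2 : Step routes q r) : Step routes p r := by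
  rcases h1 with ⟨δ1, hq1, hnd1, hfr1, hm1⟩
  rcases h2 with ⟨δ2, hq2, hnd2, hfr2, hm2⟩
  refine ⟨δ1 ++ δ2, by rw [hq2, hq1, List.append_assoc], ?_, ?_, ?_⟩
  · refine List.Nodup.append hnd1 hnd2 ?_
    intro x hx1 hx2
    exact (hfr2 x hx2).1 ((hm1 x).mpr (Or.inr hx1))
  · intro x hx
    rcases List.mem_append.mp hx with h | h
    · exact hfr1 x h
    · exact ⟨fun hv => (hfr2 x h).1 ((hm1 x).mpr (Or.inl hv)), (hfr2 x h).2⟩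
  · intro x
    rw [hm2 x, hm1 x, List.mem_append]
    tauto

theorem sweepL_step (routes : List (List Int)) (route : List Int)
    (hr : ∀ x ∈ route, x ∈ routes.flatten) :
    ∀ (acc : List Int) (vs : PySem.Set Int),
      Step routes (acc, vs) ((sweepL route acc vs).1, (sweepL route acc vs).2) := by
  induction route with
  | nil => intro acc vs; exact Step_refl routes (acc, vs)
  | cons a t ih =>
    intro acc vs
    have hr' : ∀ x ∈ t, x ∈ routes.flatten := fun x hx => hr x (by simp [hx])
    by_cases h : a ∈ vs
    · have e : sweepL (a :: t) acc vs = sweepL t acc vs := by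
        simp only [sweepL, List.foldl_cons]; rw [if_pos h]
      rw [e]; exact ih hr' acc vs
    · have e : sweepL (a :: t) acc vs = sweepL t (acc ++ [a]) (PySem.Set.add vs a) := by
        simp only [sweepL, List.foldl_cons]; rw [if_neg h]
      rw [e]
      refine Step_trans routes (acc, vs) (acc ++ [a], PySem.Set.add vs a) _ ?_ (ih hr' _ _)
      refine ⟨[a], rfl, by simp, ?_, ?_⟩
      · intro x hx
        simp only [List.mem_singleton] at hx
        rw [hx]
        exact ⟨h, hr a (by simp)⟩
      · intro x
        simp only [PySem.Set.mem_add, List.mem_singleton]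

theorem takeBus_step (routes : List (List Int))
    (st : List Int × PySem.Set Int × PySem.Set Int) (bus : Int) :
    Step routes (st.1, st.2.1) ((takeBus routes st bus).1, (takeBus routes st bus).2.1) := by
  unfold takeBus
  by_cases h : bus ∈ st.2.2
  · rw [if_pos h]; exact Step_refl routes _
  · rw [if_neg h]
    simp only [scanStops_eq_sweepL]
    have hr : ∀ x ∈ (PySem.List.pyGet? routes bus).getD [], x ∈ routes.flatten := by
      intro x hx
      rcases hRoute : PySem.List.pyGet? routes bus with _ | r
      · rw [hRoute] at hx; cases hx
      · rw [hRoute] at hx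
        exact List.mem_flatten.mpr ⟨r, PySem.List.mem_of_pyGet?_eq_some routes hRoute, hx⟩
    exact sweepL_step routes _ hr st.1 st.2.1

theorem foldL_step (routes : List (List Int)) (lb : List Int) :
    ∀ (st : List Int × PySem.Set Int × PySem.Set Int),
    Step routes (st.1, st.2.1)
      ((lb.foldl (takeBus routes) st).1, (lb.foldl (takeBus routes) st).2.1) := by
  induction lb with
  | nil => intro st; exact Step_refl routes _
  | cons b t ih =>
    intro st
    rw [List.foldl_cons]
    exact Step_trans routes _ _ _ (takeBus_step routes st b) (ih (takeBus routes st b))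

theorem levelB_step (routes : List (List Int)) (gB : PySem.Dict Int (List Int))
    (L : List Int) (vs vb : PySem.Set Int) :
    Step routes ([], vs) ((levelB routes gB L vs vb).1, (levelB routes gB L vs vb).2.1) := by
  suffices H : ∀ (st : List Int × PySem.Set Int × PySem.Set Int),
      Step routes (st.1, st.2.1)
        ((L.foldl (expandStop routes gB) st).1, (L.foldl (expandStop routes gB) st).2.1) by
    exact H ([], vs, vb)
  induction L with
  | nil => intro st; exact Step_refl routes _
  | cons a t ih =>
    intro st
    rw [List.foldl_cons]
    refine Step_trans routes _ _ _ ?_ (ih (expandStop routes gB st a))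
    exact foldL_step routes _ st

theorem Step_count (routes : List (List Int)) (vs vs' : PySem.Set Int) (Δ : List Int)
    (h : Step routes ([], vs) (Δ, vs')) : Δ.length + U routes vs' ≤ U routes vs := by
  rcases h with ⟨δ, hΔ, hnd, hfr, hm⟩
  simp only at hΔ hm
  rw [List.nil_append] at hΔ
  subst hΔ
  unfold U
  set D := routes.flatten.dedup with hD
  have hDnd : D.Nodup := List.nodup_dedup _
  set M := D.filter (fun s => decide (s ∉ vs)) with hM
  have hsplit : M.length = (M.filter (fun s => decide (s ∉ Δ))).length
      + (M.filter (fun s => !(decide (s ∉ Δ)))).length :=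
    List.length_eq_length_filter_add _
  have hM' : D.filter (fun s => decide (s ∉ vs')) = M.filter (fun s => decide (s ∉ Δ)) := by
    rw [hM, List.filter_filter]
    apply List.filter_congr
    intro x _
    have hx : (x ∉ vs') ↔ (x ∉ vs ∧ x ∉ Δ) := by rw [hm x]; tauto
    simp [hx]
    exact Bool.and_comm _ _
  have hMnd : M.Nodup := hDnd.filter _
  have hfnd : (M.filter (fun s => !(decide (s ∉ Δ)))).Nodup := hMnd.filter _
  have hfin : (M.filter (fun s => !(decide (s ∉ Δ)))).toFinset = Δ.toFinset := by
    apply Finset.ext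
    intro x
    simp only [List.mem_toFinset, List.mem_filter, Bool.not_eq_eq_eq_not, Bool.not_true,
      decide_eq_false_iff_not, not_not]
    constructor
    · exact fun hx => hx.2
    · intro hx
      refine ⟨?_, hx⟩
      rw [hM, List.mem_filter]
      refine ⟨?_, by simpa using (hfr x hx).1⟩
      rw [hD, List.mem_dedup]
      exact (hfr x hx).2
  have hlen : (M.filter (fun s => !(decide (s ∉ Δ)))).length = Δ.length := by
    rw [← List.toFinset_card_of_nodup hfnd, ← List.toFinset_card_of_nodup hnd, hfin]
  rw [hM']
  omega

-- ---------- group 5: the simulation ----------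

theorem sim (routes : List (List Int)) (target : Int) (gA : PySem.Dict Int (PySem.Set Int))
    (gB : PySem.Dict Int (List Int))
    (hg : ∀ k, PySem.Dict.getD gA k PySem.Set.empty = PySem.Set.ofList (PySem.Dict.getD gB k [])) :
    ∀ (fB : Nat) (L : List Int) (vs vb : PySem.Set Int) (d : Int) (fA : Nat),
      InvRB routes vs vb → L.length + U routes vs + 1 ≤ fA → U routes vs + 2 ≤ fB →
      routersLoopA routes target gA fA (L.map (fun s => (s, d))) vs vb
        = levelLoopB routes target gB fB L vs vb d := by
  intro fB
  induction fB with
  | zero => intro L vs vb d fA _ _ h2; omega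
  | succ fB ih =>
    intro L vs vb d fA hinv h1 h2
    match L with
    | [] =>
      match fA, h1 with
      | fA + 1, _ => rfl
    | a :: L' =>
      by_cases hT : target ∈ a :: L'
      · have := loopA_finds routes target gA d (a :: L') [] vs vb fA hT (by simp at h1 ⊢; omega)
        simp only [List.map_nil, List.append_nil] at this
        rw [this]
        simp only [levelLoopB]
        rw [if_pos hT]
      · have hlev := loopA_level routes target gA d (a :: L') [] vs vb fA hT (by simp at h1 ⊢; omega)
        simp only [List.map_nil, List.append_nil, List.nil_append] at hlev
        rw [hlev, levelA_eq_levelB routes gA gB hg d (a :: L') vs vb hinv]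
        rcases hLB : levelB routes gB (a :: L') vs vb with ⟨Δ, vs1, vb1⟩
        have hstep : Step routes ([], vs) (Δ, vs1) := by
          have := levelB_step routes gB (a :: L') vs vb
          rw [hLB] at this; exact this
        have hcount : Δ.length + U routes vs1 ≤ U routes vs := Step_count routes vs vs1 Δ hstep
        have hinv1 : InvRB routes vs1 vb1 := by
          have := levelB_inv routes gB (a :: L') vs vb hinv
          rw [hLB] at this; exact this
        have hBred : levelLoopB routes target gB (fB + 1) (a :: L') vs vb d
            = levelLoopB routes target gB fB Δ vs1 vb1 (d + 1) := by
          simp only [levelLoopB]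
          rw [if_neg hT]
          have : (a :: L').foldl (expandStop routes gB) ([], vs, vb) = (Δ, vs1, vb1) := hLB
          rw [this]
        rw [hBred]
        by_cases hΔnil : Δ = []
        · subst hΔnil
          obtain ⟨k, hk⟩ : ∃ k, fA - (a :: L').length = k + 1 := by
            refine ⟨fA - (a :: L').length - 1, ?_⟩
            simp only [List.length_cons] at h1 ⊢
            omega
          rw [hk]
          obtain ⟨m, hm2⟩ : ∃ m, fB = m + 1 := ⟨fB - 1, by omega⟩
          rw [hm2]
          rfl
        · obtain ⟨b, Δ', hbΔ⟩ : ∃ b Δ', Δ = b :: Δ' := by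
            cases Δ with
            | nil => exact absurd rfl hΔnil
            | cons b Δ' => exact ⟨b, Δ', rfl⟩
          subst hbΔ
          apply ih (b :: Δ') vs1 vb1 (d + 1) (fA - (a :: L').length) hinv1
          · simp only [List.length_cons] at h1 hcount ⊢
            omega
          · simp only [List.length_cons] at hcount h2 ⊢
            omega

-- ===== VERDICT (by name: the statement is the Claim_ definition above) =====
theorem routers_spec : Claim_equal_routers := by
  intro routes source target _
  unfold Spec_routers routers routers_alt
  by_cases h : source = target
  · rw [if_pos h, if_pos h]
  · rw [if_neg h, if_neg h]
    have hU : U routes PySem.Set.empty ≤ routes.flatten.length := by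
      calc ((routes.flatten.dedup).filter (fun s => decide (s ∉ PySem.Set.empty))).length
          ≤ routes.flatten.dedup.length := List.length_filter_le _ _
        _ ≤ routes.flatten.length := routes.flatten.dedup_sublist.length_le
    have h1 : ([source] : List Int).length + U routes PySem.Set.empty + 1 ≤ routes.flatten.length + 2 := by
      simp only [List.length_cons, List.length_nil]; omega
    have h2 : U routes PySem.Set.empty + 2 ≤ routes.flatten.length + 2 := by omega
    exact sim routes target _ _ (graph_rel routes) (routes.flatten.length + 2)
      [source] PySem.Set.empty PySem.Set.empty 0 (routes.flatten.length + 2)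
      (fun b hb => by cases hb) h1 h2
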